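-- pv_equiv track=rewrite | github.com/i-pan/SKP | skp/toolbox/functions.py | convert_to_2dc
-- ===== SOURCE A (Python) =====
-- from typing import Dict, Optional, Sequence
--
-- def convert_to_2dc(list_of_files: Sequence[str], size: int = 3) -> Sequence[str]:
--     """
--     This function converts a list of single image files into "2Dc" format.
--
--     e.g.,
--     [a, b, c, d, e] -> [a,a,b, a,b,c, b,c,d, c,d,e, d,e,e]
--
--     Assumes list_of_files is already SORTED.
--     """
--     original_length = len(list_of_files)
--     if not isinstance(list_of_files, list):
--         list_of_files = list(list_of_files)
--     assert size % 2 == 1, f"size [{size}] should be an odd number"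
--     pad = size // 2
--     # Duplicate first and last slices at the beginning and end of the list
--     list_of_files = [list_of_files[0]] * pad + list_of_files + [list_of_files[-1]] * pad
--     list_of_files_2dc = []
--     for i in range(original_length):
--         list_of_files_2dc.append(list_of_files[i : i + size])
--     return list_of_files_2dc
-- ===== SOURCE B (Python) =====
-- from typing import Sequence
--
-- def convert_to_2dc(list_of_files: Sequence[str], size: int = 3) -> Sequence[str]:
--     """2Dc windows by clamped indexing: no physical padding list is built."""
--     original_length = len(list_of_files)
--     if not isinstance(list_of_files, list):
--         list_of_files = list(list_of_files)
--     assert size % 2 == 1, f"size [{size}] should be an odd number"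
--     pad = size // 2
--     n = original_length
--     return [[list_of_files[min(max(j, 0), n - 1)]
--              for j in range(i - pad, i - pad + size)]
--             for i in range(n)]
-- ===== Notes on version B (the rewrite author's own statement) =====
-- stated objective: simpler
-- what changed: B drops A's physically padded copy of the list and its slicing; each window is produced directly by index-clamped lookups into the original list.
-- outside the precondition, e.g. on convert_to_2dc(['a', 'b'], -1): A returns [['a'], []], B returns [[], []]; on convert_to_2dc([], 3): A raises IndexError, B returns []
import Mathlib
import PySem

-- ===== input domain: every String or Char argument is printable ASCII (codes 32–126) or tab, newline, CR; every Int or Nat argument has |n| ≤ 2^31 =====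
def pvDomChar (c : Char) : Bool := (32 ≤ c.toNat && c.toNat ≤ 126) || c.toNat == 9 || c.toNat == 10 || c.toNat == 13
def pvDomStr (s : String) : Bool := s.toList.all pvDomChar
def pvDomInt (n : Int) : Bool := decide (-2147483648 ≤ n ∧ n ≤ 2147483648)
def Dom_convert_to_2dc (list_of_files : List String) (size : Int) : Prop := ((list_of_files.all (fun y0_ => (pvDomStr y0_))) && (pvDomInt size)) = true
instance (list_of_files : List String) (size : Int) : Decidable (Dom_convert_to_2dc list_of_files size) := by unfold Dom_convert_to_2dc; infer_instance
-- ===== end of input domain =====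

/- B builds each 2Dc window by index-clamped lookups into the original list instead of
   materialising A's padded copy and slicing it: simpler, no intermediate list. -/


-- ===== PORT A =====
-- literal port of A: pad the list with `pad` copies of the first/last element, then slice.
-- (On the empty list Python raises IndexError at list_of_files[0]; excluded by Pre_, the
-- port's `.getD ""` there is never claimed about.)
def convert_to_2dc (list_of_files : List String) (size : Int) : List (List String) :=
  let original_length := list_of_files.length
  let pad := PySem.Int.floordiv size 2
  let first := (PySem.List.pyGet? list_of_files 0).getD ""
  let last := (PySem.List.pyGet? list_of_files (-1)).getD ""
  let padded := List.replicate pad.toNat first ++ list_of_files ++ List.replicate pad.toNat last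
  (List.range original_length).map
    (fun i => PySem.List.slice padded (some (i : Int)) (some ((i : Int) + size)))

-- ===== PORT B =====
-- literal port of Source B: each window by clamped indexing into the original list.
def convert_to_2dc_alt (list_of_files : List String) (size : Int) : List (List String) :=
  let n := list_of_files.length
  let pad := PySem.Int.floordiv size 2
  (List.range n).map
    (fun i => (PySem.List.pyRange ((i : Int) - pad) ((i : Int) - pad + size) 1).map
      (fun j => (PySem.List.pyGet? list_of_files (min (max j 0) ((n : Int) - 1))).getD ""))

-- ===== PRECONDITION & SPEC =====
-- Pre_ excludes the empty list, on which A raises IndexError at list_of_files[0], and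
-- restricts size to the function's natural domain of a positive odd window width (A also
-- returns on negative odd sizes, but only via Python's negative slice-end wraparound,
-- which produces accidental fragments no caller would specify).
def Pre_convert_to_2dc (list_of_files : List String) (size : Int) : Prop :=
  list_of_files ≠ [] ∧ 1 ≤ size ∧ PySem.Int.mod size 2 = 1
instance (list_of_files : List String) (size : Int) : Decidable (Pre_convert_to_2dc list_of_files size) := by unfold Pre_convert_to_2dc; infer_instance
def pvWitness_convert_to_2dc : List String × Int := (["a", "b", "c", "d", "e"], 3)

def Spec_convert_to_2dc (list_of_files : List String) (size : Int) (out : List (List String)) : Prop := out = convert_to_2dc_alt list_of_files size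
instance (list_of_files : List String) (size : Int) (out : List (List String)) : Decidable (Spec_convert_to_2dc list_of_files size out) := by unfold Spec_convert_to_2dc; infer_instance

-- ===== CLAIM (what is proved, stated in full; the proofs are below) =====
def Claim_equal_convert_to_2dc : Prop := ∀ (list_of_files : List String) (size : Int), Dom_convert_to_2dc list_of_files size → Pre_convert_to_2dc list_of_files size → Spec_convert_to_2dc list_of_files size (convert_to_2dc list_of_files size)

-- ===== LEMMAS AND PROOFS =====

-- key pointwise lemma: window i of A's padded slicing equals B's clamped-index window
theorem window_eq (lst : List String) (p i s : Nat)
    (hne : lst ≠ []) (hi : i < lst.length) (hs : s = 2 * p + 1) :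
    PySem.List.slice
      (List.replicate p ((PySem.List.pyGet? lst 0).getD "")
        ++ lst ++ List.replicate p ((PySem.List.pyGet? lst (-1)).getD ""))
      (some (i : Int)) (some ((i : Int) + (s : Int)))
    = (PySem.List.pyRange ((i : Int) - p) ((i : Int) - p + s) 1).map
        (fun j => (PySem.List.pyGet? lst (min (max j 0) ((lst.length : Int) - 1))).getD "") := by
  have hn : 0 < lst.length := List.length_pos_iff.mpr hne
  have hcast : (i : Int) + (s : Int) = ((i + s : Nat) : Int) := by push_cast; ring
  rw [hcast, PySem.List.slice_natCast, PySem.List.pyRange_one]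
  have hsub : ((i : Int) - p + s - ((i : Int) - p)).toNat = s := by omega
  rw [hsub, List.map_map]
  have hdrop : i + s - i = s := by omega
  rw [hdrop]
  apply List.ext_getElem
  · simp; omega
  · intro k h1 h2
    have hk : k < s := by simpa using h2
    have hlen : i + k < ((List.replicate p ((PySem.List.pyGet? lst 0).getD "")
        ++ lst ++ List.replicate p ((PySem.List.pyGet? lst (-1)).getD ""))).length := by
      simp; omega
    rw [List.getElem_take, List.getElem_drop, List.getElem_map, List.getElem_range]
    by_cases hc1 : i + k < p
    · have hmin : min (max ((i : Int) - ↑p + ↑k) 0) ((lst.length : Int) - 1) = 0 := by omega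
      rw [Function.comp, hmin]
      rw [List.getElem_append_left (by simp; omega), List.getElem_append_left (by simp; omega),
        List.getElem_replicate]
    · by_cases hc2 : i + k < p + lst.length
      · have hmin : min (max ((i : Int) - ↑p + ↑k) 0) ((lst.length : Int) - 1)
            = ((i + k - p : Nat) : Int) := by omega
        rw [Function.comp, hmin]
        rw [List.getElem_append_left (by simp; omega), List.getElem_append_right (by simp; omega)]
        simp [PySem.List.pyGet?_natCast]
        rw [List.getElem?_eq_getElem (by omega)]
        simp
      · have hmin : min (max ((i : Int) - ↑p + ↑k) 0) ((lst.length : Int) - 1)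
            = ((lst.length - 1 : Nat) : Int) := by omega
        rw [Function.comp, hmin]
        rw [List.getElem_append_right (by simp; omega), List.getElem_replicate]
        rw [PySem.List.pyGet?_natCast, PySem.List.pyGet?_neg_one,
          List.getLast?_eq_getElem?, List.getElem?_eq_getElem (by omega)]

-- ===== VERDICT (by name: the statement is the Claim_ definition above) =====
theorem convert_to_2dc_spec : Claim_equal_convert_to_2dc := by
  intro lst size hdom hpre
  obtain ⟨hne, hpos, hmod⟩ := hpre
  unfold Spec_convert_to_2dc convert_to_2dc convert_to_2dc_alt
  simp only []
  set pd := PySem.Int.floordiv size 2 with hpd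
  have h2 : pd * 2 + 1 = size := by
    have h := PySem.Int.floordiv_mul_add_mod size 2
    rw [hmod] at h; omega
  have hpdnn : pd = (pd.toNat : Int) := by omega
  have hsize : size = ((2 * pd.toNat + 1 : Nat) : Int) := by omega
  apply List.map_congr_left
  intro i hi
  obtain ⟨a, ha, rfl⟩ : ∃ a, a < lst.length ∧ i = (a : Int) := by simpa using hi
  rw [hpdnn, hsize]
  exact window_eq lst pd.toNat a (2 * pd.toNat + 1) hne ha rfl
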